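-- pv_equiv track=rewrite | github.com/anirudh-sreeram/chat_streamlit_application | lib/deploy.py | str2listoflist
-- ===== SOURCE A (Python) =====
-- def str2listoflist(cmd_out):
--     output = []
--     lines = cmd_out.split('\n')
--     header_str = lines.pop(0)
--     header = header_str.split()
--     header_indexes = []
--     for h in header:
--         header_indexes.append(header_str.find(h))
--     output.append(header)
--     for line in lines:
--         if not line:
--             continue
--         values = []
--         for i in range(len(header_indexes)):
--             if i < (len(header_indexes) - 1):
--                 values.append(line[header_indexes[i]:header_indexes[i+1]-1].strip())
--             else:
--                 values.append(line[header_indexes[i]:].strip())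
--         output.append(values)
--     return output
-- ===== SOURCE B (Python) =====
-- def str2listoflist(cmd_out):
--     lines = cmd_out.split('\n')
--     header_str = lines[0]
--     header = header_str.split()
--     body = [line for line in lines[1:] if line]
--     starts = [header_str.find(h) for h in header]
--     # column-major: extract every column from all lines at once, then transpose back to rows
--     cols = [[line[s:t - 1].strip() for line in body] for s, t in zip(starts, starts[1:])]
--     if starts:
--         cols.append([line[starts[-1]:].strip() for line in body])
--     return [header] + [[col[r] for col in cols] for r in range(len(body))]
-- ===== Notes on version B (the rewrite author's own statement) =====
-- stated objective: alternative
-- what changed: B traverses the table column-major: it extracts each whole column from all body lines at once (pairwise over header positions, last column open-ended), then transposes the column lists back into rows by index, replacing A's row-major per-line loop with its in-loop last-column branch.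
import Mathlib
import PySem

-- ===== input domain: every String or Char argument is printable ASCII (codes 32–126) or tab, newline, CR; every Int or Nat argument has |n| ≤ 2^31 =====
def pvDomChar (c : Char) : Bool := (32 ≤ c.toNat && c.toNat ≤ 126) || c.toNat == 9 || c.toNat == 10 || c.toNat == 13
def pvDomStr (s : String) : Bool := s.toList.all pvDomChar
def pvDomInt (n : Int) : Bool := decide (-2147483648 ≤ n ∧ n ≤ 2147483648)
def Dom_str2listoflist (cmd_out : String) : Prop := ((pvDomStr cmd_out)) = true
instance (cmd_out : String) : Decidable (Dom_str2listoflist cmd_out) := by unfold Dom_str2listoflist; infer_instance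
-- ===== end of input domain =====

-- B traverses the table column-major — each whole column extracted from all body lines
-- at once, then the columns transposed back into rows by index (objective: alternative).

-- ===== PORT A =====
def str2listoflist (cmd_out : String) : List (List String) :=
  let output : List (List String) := []
  let lines := (PySem.Str.split? cmd_out "\n").getD [""]
  let header_str := lines.headD ""      -- lines.pop(0): split with a nonempty sep never returns []
  let lines := lines.tail
  let header := PySem.Str.split₀ header_str
  let header_indexes := header.foldl
    (fun acc h => acc ++ [PySem.Str.find header_str h]) []
  let output := output ++ [header]
  let output := lines.foldl (fun output line =>
    if line = "" then output
    else
      let values := (PySem.List.pyRange 0 header_indexes.length 1).foldl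
        (fun values i =>
          if i < (header_indexes.length : Int) - 1 then
            values ++ [PySem.Str.strip (PySem.Str.slice line
              (some (PySem.List.pyGetD header_indexes i 0))
              (some (PySem.List.pyGetD header_indexes (i + 1) 0 - 1)))]
          else
            values ++ [PySem.Str.strip (PySem.Str.slice line
              (some (PySem.List.pyGetD header_indexes i 0)) none)]) []
      output ++ [values]) output
  output

-- ===== PORT B =====
def str2listoflist_alt (cmd_out : String) : List (List String) :=
  let lines := (PySem.Str.split? cmd_out "\n").getD [""]
  let header_str := lines.headD ""
  let header := PySem.Str.split₀ header_str
  let body := lines.tail.filter (fun l => l ≠ "")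
  let starts := header.map (fun h => PySem.Str.find header_str h)
  -- column-major: one list per column, extracted from all body lines
  let cols : List (List String) := (starts.zip starts.tail).map (fun p =>
    body.map (fun line => PySem.Str.strip (PySem.Str.slice line (some p.1) (some (p.2 - 1)))))
  let cols := match starts.getLast? with
    | some s => cols ++ [body.map (fun line => PySem.Str.strip (PySem.Str.slice line (some s) none))]
    | none => cols
  -- transpose the columns back into rows by index
  header :: (PySem.List.pyRange 0 body.length 1).map (fun r =>
    cols.map (fun col => PySem.List.pyGetD col r ""))

-- ===== PRECONDITION & SPEC =====
def Spec_str2listoflist (cmd_out : String) (out : List (List String)) : Prop := out = str2listoflist_alt cmd_out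
instance (cmd_out : String) (out : List (List String)) : Decidable (Spec_str2listoflist cmd_out out) := by unfold Spec_str2listoflist; infer_instance

-- ===== CLAIM (what is proved, stated in full; the proofs are below) =====
def Claim_equal_str2listoflist : Prop := ∀ (cmd_out : String), Dom_str2listoflist cmd_out → Spec_str2listoflist cmd_out (str2listoflist cmd_out)

-- ===== LEMMAS AND PROOFS =====

-- The column boundary of each column, as a standalone function of the column start indexes.
def pvBounds (idxs : List Int) : List (Int × Option Int) :=
  (idxs.zip idxs.tail).map (fun p => (p.1, some (p.2 - 1)))
    ++ (match idxs.getLast? with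
        | some s => [(s, none)]
        | none => [])

lemma pvBounds_length (idxs : List Int) : (pvBounds idxs).length = idxs.length := by
  unfold pvBounds
  cases h : idxs.getLast? with
  | none =>
    have : idxs = [] := List.getLast?_eq_none_iff.mp h
    simp [this]
  | some s =>
    have hne : idxs ≠ [] := by intro he; simp [he] at h
    have hl : 0 < idxs.length := List.length_pos_iff.mpr hne
    simp only [List.length_append, List.length_map, List.length_zip, List.length_tail,
      List.length_cons, List.length_nil]
    omega

-- A's guarded accumulate-or-skip loop is append of a filtered map.
lemma skip_loop (f : String → List String) (xs : List String) (init : List (List String)) :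
    xs.foldl (fun acc line => if line = "" then acc else acc ++ [f line]) init
      = init ++ (xs.filter (fun l => l ≠ "")).map f := by
  induction xs generalizing init with
  | nil => simp
  | cons x xs ih => by_cases h : x = "" <;> simp [h, ih]

-- A's per-line loop equals the slice-and-strip of the line at each column boundary.
lemma row_eq (idxs : List Int) (line : String) :
    (PySem.List.pyRange 0 idxs.length 1).foldl
      (fun values i =>
        if i < (idxs.length : Int) - 1 then
          values ++ [PySem.Str.strip (PySem.Str.slice line
            (some (PySem.List.pyGetD idxs i 0))
            (some (PySem.List.pyGetD idxs (i + 1) 0 - 1)))]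
        else
          values ++ [PySem.Str.strip (PySem.Str.slice line
            (some (PySem.List.pyGetD idxs i 0)) none)]) []
    = (pvBounds idxs).map
        (fun p => PySem.Str.strip (PySem.Str.slice line (some p.1) p.2)) := by
  rw [show (fun (values : List String) (i : Int) =>
        if i < (idxs.length : Int) - 1 then
          values ++ [PySem.Str.strip (PySem.Str.slice line
            (some (PySem.List.pyGetD idxs i 0))
            (some (PySem.List.pyGetD idxs (i + 1) 0 - 1)))]
        else
          values ++ [PySem.Str.strip (PySem.Str.slice line
            (some (PySem.List.pyGetD idxs i 0)) none)]) =
      (fun (values : List String) (i : Int) =>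
        values ++ [if i < (idxs.length : Int) - 1 then
          PySem.Str.strip (PySem.Str.slice line
            (some (PySem.List.pyGetD idxs i 0))
            (some (PySem.List.pyGetD idxs (i + 1) 0 - 1)))
        else
          PySem.Str.strip (PySem.Str.slice line
            (some (PySem.List.pyGetD idxs i 0)) none)])
      from by funext values i; split <;> rfl]
  rw [PySem.List.foldl_append_singleton_eq_map, List.nil_append, PySem.List.pyRange_one]
  rw [List.map_map]
  apply List.ext_getElem
  · simp [pvBounds_length]
  · intro k h1 h2
    simp only [List.getElem_map, List.getElem_range, Function.comp_apply]
    simp only [List.length_map, List.length_range] at h1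
    have hk : k < idxs.length := by omega
    rw [List.length_map, pvBounds_length] at h2
    unfold pvBounds
    have hne : idxs ≠ [] := by intro he; subst he; simp at hk
    have hzl : (idxs.zip idxs.tail).length = idxs.length - 1 := by
      simp only [List.length_zip, List.length_tail]
      have : 0 < idxs.length := List.length_pos_iff.mpr hne
      omega
    by_cases hlast : k = idxs.length - 1
    · -- last column: open-ended slice
      have hif : ¬ ((0 : Int) + (k : Int) < (idxs.length : Int) - 1) := by omega
      rw [if_neg hif]
      simp only [List.getLast?_eq_some_getLast hne]
      rw [List.getElem_append_right
        (by rw [List.length_map, hzl]; omega)]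
      have hkk : k - (List.map (fun (p : Int × Int) => (p.1, some (p.2 - 1)))
          (idxs.zip idxs.tail)).length = 0 := by
        rw [List.length_map, hzl]; omega
      simp only [hkk, List.getElem_cons_zero]
      have e1 : (0 : Int) + (k : Int) = ((k : Nat) : Int) := by omega
      rw [e1, PySem.List.pyGetD_natCast, List.getD_eq_getElem _ _ hk,
        List.getLast_eq_getElem]
      simp only [hlast]
    · -- inner column: end = next start - 1
      have hk1 : k + 1 < idxs.length := by omega
      have hif : ((0 : Int) + (k : Int) < (idxs.length : Int) - 1) := by omega
      rw [if_pos hif]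
      rw [List.getElem_append_left (by rw [List.length_map, hzl]; omega)]
      simp only [List.getElem_map, List.getElem_zip, List.getElem_tail]
      have e1 : (0 : Int) + (k : Int) = ((k : Nat) : Int) := by omega
      rw [e1]
      have e2 : ((k : Nat) : Int) + 1 = (((k + 1) : Nat) : Int) := by push_cast; omega
      rw [e2, PySem.List.pyGetD_natCast, PySem.List.pyGetD_natCast,
        List.getD_eq_getElem _ _ hk, List.getD_eq_getElem _ _ hk1]

-- B's column list, abstracted: one cell-extraction function per column.
def pvColFuns (idxs : List Int) : List (String → String) :=
  (pvBounds idxs).map (fun p line => PySem.Str.strip (PySem.Str.slice line (some p.1) p.2))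

-- B's literal cols construction is the per-column map of each column function over the body.
lemma cols_eq (idxs : List Int) (body : List String) :
    (let cols : List (List String) := (idxs.zip idxs.tail).map (fun p =>
        body.map (fun line => PySem.Str.strip (PySem.Str.slice line (some p.1) (some (p.2 - 1)))))
     match idxs.getLast? with
     | some s => cols ++ [body.map (fun line => PySem.Str.strip (PySem.Str.slice line (some s) none))]
     | none => cols)
    = (pvColFuns idxs).map (fun f => body.map f) := by
  unfold pvColFuns pvBounds
  cases idxs.getLast? with
  | none => simp [List.map_map]
  | some s => simp [List.map_map]

-- Transposing column-major maps back by index recovers the row-major map: order does not matter.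
lemma transpose_eq (fs : List (String → String)) (body : List String) :
    (PySem.List.pyRange 0 body.length 1).map (fun r =>
        (fs.map (fun f => body.map f)).map (fun col => PySem.List.pyGetD col r ""))
      = body.map (fun line => fs.map (fun f => f line)) := by
  rw [PySem.List.pyRange_one]
  simp only [Int.sub_zero, Int.toNat_natCast, List.map_map]
  apply List.ext_getElem
  · simp
  · intro k h1 h2
    simp only [List.getElem_map, List.getElem_range, Function.comp_apply]
    simp only [List.length_map, List.length_range] at h1
    apply List.map_congr_left
    intro f _
    have e1 : (0 : Int) + (k : Int) = ((k : Nat) : Int) := by omega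
    rw [Function.comp_apply, e1, PySem.List.pyGetD_natCast,
      List.getD_eq_getElem _ _ (by simpa using h1), List.getElem_map]

-- ===== VERDICT (by name: the statement is the Claim_ definition above) =====
theorem str2listoflist_spec : Claim_equal_str2listoflist := by
  intro cmd_out _
  unfold Spec_str2listoflist str2listoflist str2listoflist_alt
  simp only []
  rw [PySem.List.foldl_append_singleton_eq_map, List.nil_append, skip_loop,
    List.nil_append, List.singleton_append]
  refine congr_arg₂ List.cons rfl ?_
  rw [cols_eq, transpose_eq]
  apply List.map_congr_left
  intro line _
  rw [row_eq]
  unfold pvColFuns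
  rw [List.map_map]
  rfl
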